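-- pv_equiv track=rewrite | github.com/PurthaShaariyaar/OA | minFlips.py | minimumFlips
-- ===== SOURCE A (Python) =====
-- def minimumFlips(target):
--     flips = 0
--     current = "0" * len(target)  # Initial string of zeros
--
--     for i in range(len(target)):
--         if current[i] != target[i]:
--             flips += 1
--             current = current[:i] + flip(current[i]) + current[i+1:]
--
--     return flips
--
-- def flip(char):
--     return "0" if char == "1" else "1"
--
-- target = "00110"
-- ===== SOURCE B (Python) =====
-- def minimumFlips(target):
--     return sum(1 for c in target if c != '0')
-- ===== Notes on version B (the rewrite author's own statement) =====
-- stated objective: faster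
-- what changed: A simulates the flips by rebuilding the whole working string at each mismatching index (quadratic); since the scanned character of the working string is always the zero character, B replaces that with a single pass that counts the characters of the target differing from the zero character.
import Mathlib
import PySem

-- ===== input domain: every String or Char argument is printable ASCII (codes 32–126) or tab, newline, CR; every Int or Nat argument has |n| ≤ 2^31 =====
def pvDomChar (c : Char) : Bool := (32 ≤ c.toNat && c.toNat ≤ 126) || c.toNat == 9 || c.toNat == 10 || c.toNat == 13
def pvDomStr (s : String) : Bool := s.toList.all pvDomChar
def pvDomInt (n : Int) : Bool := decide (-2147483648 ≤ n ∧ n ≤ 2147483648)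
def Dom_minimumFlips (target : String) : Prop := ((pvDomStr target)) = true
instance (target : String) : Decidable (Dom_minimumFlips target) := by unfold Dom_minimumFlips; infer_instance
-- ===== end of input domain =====

-- B is a one-pass count of characters ≠ '0'; A rebuilds the string at each flip (a timing run measured B faster).
-- ===== PORT A =====
-- helper 'flip' of A
def pyFlip (c : Char) : Char := if c = '1' then '0' else '1'

-- loop body of A: state (flips, current); index i
def stepA (t : List Char) (st : Int × List Char) (i : Int) : Int × List Char :=
  if PySem.List.pyGetD st.2 i ' ' ≠ PySem.List.pyGetD t i ' ' then
    (st.1 + 1,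
     PySem.List.slice st.2 none (some i)
       ++ [pyFlip (PySem.List.pyGetD st.2 i ' ')]
       ++ PySem.List.slice st.2 (some (i + 1)) none)
  else
    st

def minimumFlips (target : String) : Int :=
  let t := target.toList
  let init : Int × List Char := (0, List.replicate t.length '0')
  ((PySem.List.pyRange 0 (t.length : Int) 1).foldl (stepA t) init).1

-- ===== PORT B =====
def minimumFlips_alt (target : String) : Int :=
  target.toList.foldl (fun acc c => if c ≠ '0' then acc + 1 else acc) 0

-- ===== PRECONDITION & SPEC =====
def Spec_minimumFlips (target : String) (out : Int) : Prop := out = minimumFlips_alt target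
instance (target : String) (out : Int) : Decidable (Spec_minimumFlips target out) := by unfold Spec_minimumFlips; infer_instance

-- ===== CLAIM (what is proved, stated in full; the proofs are below) =====
def Claim_equal_minimumFlips : Prop := ∀ (target : String), Dom_minimumFlips target → Spec_minimumFlips target (minimumFlips target)

-- ===== LEMMAS AND PROOFS =====

-- the element under the cursor of 'current' is always '0'
lemma getD_append_cons (pre : List Char) (y : Char) (ys : List Char) (d : Char) :
    (pre ++ y :: ys).getD pre.length d = y := by
  simp [List.getD]

-- loop invariant: with current = pre ++ zeros and suf the unprocessed suffix of t,
-- A's remaining loop adds exactly B's count over suf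
lemma loopA (t : List Char) (suf : List Char) : ∀ (pre : List Char) (flips : Int),
    suf = t.drop pre.length →
    ((PySem.List.pyRange (pre.length : Int) ((pre.length : Int) + (suf.length : Int)) 1).foldl
        (stepA t) (flips, pre ++ List.replicate suf.length '0')).1
      = suf.foldl (fun acc c => if c ≠ '0' then acc + 1 else acc) flips := by
  induction suf with
  | nil =>
      intro pre flips _
      simp [PySem.List.pyRange]
  | cons c rest ih =>
      intro pre flips h
      have h0 : t[pre.length]? = some c := by
        have h1 : (t.drop pre.length)[0]? = some c := by rw [← h]; rfl
        simpa [List.getElem?_drop] using h1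
      have hc : PySem.List.pyGetD t (pre.length : Int) ' ' = c := by
        simp [PySem.List.pyGetD_natCast, List.getD, h0]
      have hrest : rest = t.drop (pre.length + 1) := by
        have h2 : t.drop (pre.length + 1) = (t.drop pre.length).drop 1 := by
          rw [List.drop_drop]
        rw [h2, ← h]; rfl
      have hrange : PySem.List.pyRange (pre.length : Int) ((pre.length : Int) + ((c :: rest).length : Int)) 1
          = (pre.length : Int) :: PySem.List.pyRange ((pre.length : Int) + 1) ((pre.length : Int) + ((c :: rest).length : Int)) 1 := by
        apply PySem.List.pyRange_one_cons
        simp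
      have hcur0 : PySem.List.pyGetD (pre ++ List.replicate (c :: rest).length '0') (pre.length : Int) ' ' = '0' := by
        rw [List.length_cons, List.replicate_succ, PySem.List.pyGetD_natCast]
        exact getD_append_cons pre '0' _ ' '
      have hcut : PySem.List.slice (pre ++ List.replicate (c :: rest).length '0') none (some (pre.length : Int)) = pre := by
        rw [PySem.List.slice_to_natCast]; simp
      have hdrop : PySem.List.slice (pre ++ List.replicate (c :: rest).length '0') (some ((pre.length : Int) + 1)) none = List.replicate rest.length '0' := by
        rw [show ((pre.length : Int) + 1) = (((pre.length + 1 : Nat)) : Int) by push_cast; ring,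
            PySem.List.slice_from_natCast,
            List.length_cons, List.replicate_succ,
            show pre ++ '0' :: List.replicate rest.length '0' = (pre ++ ['0']) ++ List.replicate rest.length '0' by simp,
            show pre.length + 1 = (pre ++ ['0']).length by simp,
            List.drop_left]
      have hstep : stepA t (flips, pre ++ List.replicate (c :: rest).length '0') (pre.length : Int)
          = (if c ≠ '0' then flips + 1 else flips,
             (pre ++ [if c ≠ '0' then '1' else '0']) ++ List.replicate rest.length '0') := by
        simp only [stepA]
        rw [hcur0, hc, hcut, hdrop]
        by_cases hco : c = '0'
        · simp [hco, List.replicate_succ]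
        · simp [hco, pyFlip, Ne.symm hco]
      rw [hrange, List.foldl_cons, hstep]
      have hih := ih (pre ++ [if c ≠ '0' then '1' else '0'])
        (if c ≠ '0' then flips + 1 else flips) (by simpa using hrest)
      have e1 : ((pre.length : Int) + 1) = (((pre ++ [if c ≠ '0' then '1' else '0']).length : Nat) : Int) := by
        simp only [List.length_append, List.length_cons, List.length_nil]; push_cast; ring
      have e2 : ((pre.length : Int) + ((c :: rest).length : Int))
          = (((pre ++ [if c ≠ '0' then '1' else '0']).length : Nat) : Int) + ((rest.length : Nat) : Int) := by
        simp only [List.length_append, List.length_cons, List.length_nil]; push_cast; ring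
      rw [e1, e2, hih]
      simp [List.foldl_cons]

theorem minimumFlips_spec : Claim_equal_minimumFlips := by
  unfold Claim_equal_minimumFlips Spec_minimumFlips minimumFlips minimumFlips_alt
  intro target _
  have := loopA target.toList target.toList [] 0 (by simp)
  simpa using this
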